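-- pv_equiv track=rewrite | github.com/lorenzofman/LineCode | NonReturnToZeroLevel.py | nrz_i
-- ===== SOURCE A (Python) =====
-- high_level = 13
--
-- low_level = -13
--
-- def nrz_i(bits):
--     encoded = []
--     # Check if USB starts in low/high
--     low = False
--     for bit in bits:
--         encoded.append(low_level if low else high_level)
--         if bit == 0:
--             low = not low
--     return encoded
-- ===== SOURCE B (Python) =====
-- from itertools import accumulate
--
-- high_level = 13
--
-- low_level = -13
--
-- def nrz_i(bits):
--     # exclusive prefix parity of zeros seen before each position
--     parities = list(accumulate((1 if b == 0 else 0 for b in bits), initial=0))[:-1]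
--     return [low_level if p % 2 == 1 else high_level for p in parities]
-- ===== Notes on version B (the rewrite author's own statement) =====
-- stated objective: alternative
-- what changed: Replaces the stateful loop toggling a boolean flag while appending with a two-stage pipeline: an exclusive prefix-sum of zero indicators (itertools.accumulate) followed by a map from parity to level.
import Mathlib
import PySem

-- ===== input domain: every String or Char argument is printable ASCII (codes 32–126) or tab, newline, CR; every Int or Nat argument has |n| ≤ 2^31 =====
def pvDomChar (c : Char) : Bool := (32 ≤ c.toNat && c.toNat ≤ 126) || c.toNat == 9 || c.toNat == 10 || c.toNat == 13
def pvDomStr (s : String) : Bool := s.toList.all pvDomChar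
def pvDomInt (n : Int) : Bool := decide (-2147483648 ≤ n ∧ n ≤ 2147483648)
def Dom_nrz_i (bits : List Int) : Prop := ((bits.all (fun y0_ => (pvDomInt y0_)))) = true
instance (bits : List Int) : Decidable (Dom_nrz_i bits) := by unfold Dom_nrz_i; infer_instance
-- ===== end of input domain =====

-- B replaces A's stateful toggle-and-append loop with an exclusive prefix-sum of
-- zero indicators followed by a parity-to-level map (alternative decomposition, same cost).

-- ===== PORT A =====
-- loop state: (low flag, encoded list), exactly A's for-loop
def nrz_i (bits : List Int) : List Int :=
  (bits.foldl
    (fun (s : Bool × List Int) bit =>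
      (if bit == 0 then !s.1 else s.1, s.2 ++ [if s.1 then (-13 : Int) else 13]))
    (false, [])).2

-- ===== PORT B =====
-- stage 1: exclusive prefix sums of zero indicators (accumulate initial=0, drop last);
-- stage 2: map parity to level
def nrz_i_alt (bits : List Int) : List Int :=
  let parities :=
    ((bits.map (fun b => if b == 0 then (1 : Int) else 0)).scanl (· + ·) 0).dropLast
  parities.map (fun p => if p % 2 == 1 then (-13 : Int) else 13)

-- ===== PRECONDITION & SPEC =====
def Spec_nrz_i (bits : List Int) (out : List Int) : Prop := out = nrz_i_alt bits
instance (bits : List Int) (out : List Int) : Decidable (Spec_nrz_i bits out) := by unfold Spec_nrz_i; infer_instance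

-- ===== CLAIM (what is proved, stated in full; the proofs are below) =====
def Claim_equal_nrz_i : Prop := ∀ (bits : List Int), Dom_nrz_i bits → Spec_nrz_i bits (nrz_i bits)

-- ===== LEMMAS AND PROOFS =====

theorem nrz_i_loop (bits : List Int) (low : Bool) (acc : List Int) (c : Int)
    (h : (c % 2 = 1) ↔ low = true) :
    (bits.foldl
      (fun (s : Bool × List Int) bit =>
        (if bit == 0 then !s.1 else s.1, s.2 ++ [if s.1 then (-13 : Int) else 13]))
      (low, acc)).2
    = acc ++ (((bits.map (fun b => if b == 0 then (1 : Int) else 0)).scanl (· + ·) c).dropLast).map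
        (fun p => if p % 2 == 1 then (-13 : Int) else 13) := by
  induction bits generalizing low acc c with
  | nil => simp
  | cons b bs ih =>
    have hscan : ∀ (z : Int) (zs : List Int),
        ((z :: zs).scanl (· + ·) c).dropLast = c :: ((zs.scanl (· + ·) (c + z)).dropLast) := by
      intro z zs
      rw [List.scanl_cons]
      rw [List.dropLast_cons_of_ne_nil (by cases zs <;> simp [List.scanl_nil, List.scanl_cons])]
    have hc : (if c % 2 == 1 then (-13 : Int) else 13) = (if low then (-13 : Int) else 13) := by
      rcases Bool.eq_false_or_eq_true low with hl | hl <;>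
        simp [hl] at h ⊢ <;> simp [h] <;> omega
    by_cases hb : b = 0
    · have hz : (b == 0) = true := by simpa using hb
      simp only [List.map_cons, List.foldl_cons, hz, if_true, hscan]
      rw [ih (!low) _ (c + 1) (by rcases Bool.eq_false_or_eq_true low with hl | hl <;>
        simp [hl] at h ⊢ <;> omega), hc]
      simp
    · have hz : (b == 0) = false := by simpa using hb
      simp only [List.map_cons, List.foldl_cons, hz, Bool.false_eq_true, if_false, hscan]
      rw [ih low _ (c + 0) (by simpa using h), hc]
      simp

-- ===== VERDICT (by name: the statement is the Claim_ definition above) =====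
theorem nrz_i_spec : Claim_equal_nrz_i := by
  intro bits _
  unfold Spec_nrz_i nrz_i nrz_i_alt
  rw [nrz_i_loop bits false [] 0 (by simp)]
  simp
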